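-- pv_equiv track=rewrite | github.com/yifnzhao/CentTracker | src/track_pairer.py | findCong
-- ===== SOURCE A (Python) =====
-- def findCong(time, dist, max_dist = 6):
--     t_cong = 0
--     t_prev = time[0]-1
--     all_periods = []
--     for t, d in zip(time, dist):
--         if t_prev + 1 != t: # not continuous
--             if t_cong != 0:
--                 all_periods.append(t_cong)
--             t_cong = 0
--         if (d < max_dist):
--             t_cong += 1
--         t_prev = t
--     all_periods.append(t_cong)
--     return max(all_periods)
-- ===== SOURCE B (Python) =====
-- def findCong(time, dist, max_dist=6):
--     pairs = list(zip(time, dist))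
--     n = len(pairs)
--     counts = []
--     i = 0
--     while i < n:
--         # two-pointer scan: advance j to the end of the continuous-time segment
--         j = i + 1
--         while j < n and pairs[j][0] == pairs[j - 1][0] + 1:
--             j += 1
--         counts.append(sum(d < max_dist for _, d in pairs[i:j]))
--         i = j
--     return max(counts, default=0)
-- ===== Notes on version B (the rewrite author's own statement) =====
-- stated objective: alternative
-- what changed: B replaces A's single stateful pass (running counter reset via a t_prev sentinel, filtered appends, final max) by a two-pointer scan that locates each continuous-time segment by index, counts close distances over the segment slice, and takes max with default 0.
import Mathlib
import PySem

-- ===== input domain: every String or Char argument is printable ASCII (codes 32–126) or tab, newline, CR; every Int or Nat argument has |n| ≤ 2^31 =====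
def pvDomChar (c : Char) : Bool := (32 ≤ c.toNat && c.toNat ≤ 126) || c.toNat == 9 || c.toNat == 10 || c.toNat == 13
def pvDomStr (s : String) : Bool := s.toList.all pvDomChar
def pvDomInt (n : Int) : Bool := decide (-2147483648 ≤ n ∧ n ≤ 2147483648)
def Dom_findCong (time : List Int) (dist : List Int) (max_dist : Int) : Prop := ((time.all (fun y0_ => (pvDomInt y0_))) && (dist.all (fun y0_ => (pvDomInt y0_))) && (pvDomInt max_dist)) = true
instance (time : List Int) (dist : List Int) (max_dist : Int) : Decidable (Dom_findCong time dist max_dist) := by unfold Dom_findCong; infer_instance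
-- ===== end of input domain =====

-- B replaces A's stateful running-counter pass by a two-pointer index scan that slices out
-- each continuous-time segment, counts close distances per slice, and maxes with default 0.


-- ===== PORT A =====
-- loop body of A: state (t_cong, t_prev, all_periods)
def stepA (max_dist : Int) (s : Int × Int × List Int) (p : Int × Int) : Int × Int × List Int :=
  let tcap := if s.2.1 + 1 ≠ p.1 then
      (0, if s.1 ≠ 0 then s.2.2 ++ [s.1] else s.2.2)
    else (s.1, s.2.2)
  let tc2 := if p.2 < max_dist then tcap.1 + 1 else tcap.1
  (tc2, p.1, tcap.2)

def findCong (time : List Int) (dist : List Int) (max_dist : Int) : Int :=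
  match time with
  | [] => 0  -- Python raises IndexError on time[0]; excluded by Pre_findCong
  | t0 :: _ =>
    let s := (time.zip dist).foldl (stepA max_dist) (0, t0 - 1, [])
    ((s.2.2 ++ [s.1]).max?).getD 0

-- ===== PORT B =====
-- sum(d < max_dist for _, d in seg)
def bCnt (md : Int) (seg : List (Int × Int)) : Int :=
  (seg.map (fun p => if p.2 < md then (1 : Int) else 0)).sum

-- inner while loop: advance j while j < n and pairs[j][0] == pairs[j-1][0] + 1
-- (pairs.getD with default (0,0) is exact: Python only indexes in range here)
def bInner (pairs : List (Int × Int)) (n j : Nat) : Nat :=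
  if h : j < n ∧ (pairs.getD j (0, 0)).1 = (pairs.getD (j - 1) (0, 0)).1 + 1 then
    bInner pairs n (j + 1)
  else j
termination_by n - j
decreasing_by omega

-- the inner loop only moves j forward (needed for the outer loop's termination)
lemma bInner_ge (pairs : List (Int × Int)) (n : Nat) : ∀ j, j ≤ bInner pairs n j := by
  have key : ∀ m j, n - j ≤ m → j ≤ bInner pairs n j := by
    intro m
    induction m with
    | zero =>
      intro j hj
      rw [bInner]
      split
      · rename_i h; exact absurd h.1 (by omega)
      · exact le_refl j
    | succ m ih =>
      intro j hj
      rw [bInner]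
      split
      · rename_i h; exact le_trans (Nat.le_succ j) (ih (j + 1) (by omega))
      · exact le_refl j
  exact fun j => key (n - j) j le_rfl

-- outer while loop: collect the per-continuous-segment counts
def bOuter (md : Int) (pairs : List (Int × Int)) (n i : Nat) : List Int :=
  if h : i < n then
    let j := bInner pairs n (i + 1)
    bCnt md (PySem.List.slice pairs (some (i : Int)) (some (j : Int))) :: bOuter md pairs n j
  else []
termination_by n - i
decreasing_by have := bInner_ge pairs n (i + 1); omega

def findCong_alt (time : List Int) (dist : List Int) (max_dist : Int) : Int :=
  let pairs := time.zip dist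
  ((bOuter max_dist pairs pairs.length 0).max?).getD 0

-- ===== PRECONDITION & SPEC =====
-- Pre_ excludes exactly time = [], on which the Python A raises IndexError (time[0]).
def Pre_findCong (time : List Int) (dist : List Int) (max_dist : Int) : Prop := time ≠ []
instance (time : List Int) (dist : List Int) (max_dist : Int) : Decidable (Pre_findCong time dist max_dist) := by unfold Pre_findCong; infer_instance
def pvWitness_findCong : List Int × List Int × Int := ([1, 2, 5, 6], [1, 9, 2, 3], 6)

def Spec_findCong (time : List Int) (dist : List Int) (max_dist : Int) (out : Int) : Prop := out = findCong_alt time dist max_dist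
instance (time : List Int) (dist : List Int) (max_dist : Int) (out : Int) : Decidable (Spec_findCong time dist max_dist out) := by unfold Spec_findCong; infer_instance

-- ===== CLAIM (what is proved, stated in full; the proofs are below) =====
def Claim_equal_findCong : Prop := ∀ (time : List Int) (dist : List Int) (max_dist : Int), Dom_findCong time dist max_dist → Pre_findCong time dist max_dist → Spec_findCong time dist max_dist (findCong time dist max_dist)

-- ===== LEMMAS AND PROOFS =====

-- length of the initial continuous run of l, the previous time being tp
def chainLen (tp : Int) : List (Int × Int) → Nat
  | [] => 0
  | p :: rest => if p.1 = tp + 1 then chainLen p.1 rest + 1 else 0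

lemma chainLen_le (tp : Int) (l : List (Int × Int)) : chainLen tp l ≤ l.length := by
  induction l generalizing tp with
  | nil => simp [chainLen]
  | cons p rest ih =>
    simp only [chainLen, List.length_cons]
    split
    · have := ih p.1; omega
    · omega

-- common characterization: the list of per-continuous-segment close counts
def segcounts (md : Int) : List (Int × Int) → List Int
  | [] => []
  | p :: rest =>
    bCnt md (p :: rest.take (chainLen p.1 rest)) :: segcounts md (rest.drop (chainLen p.1 rest))
termination_by l => l.length
decreasing_by simp only [List.length_drop, List.length_cons]; omega

lemma segcounts_nil (md : Int) : segcounts md [] = [] := by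
  conv_lhs => unfold segcounts

lemma segcounts_cons (md : Int) (p : Int × Int) (rest : List (Int × Int)) :
    segcounts md (p :: rest)
      = bCnt md (p :: rest.take (chainLen p.1 rest)) :: segcounts md (rest.drop (chainLen p.1 rest)) := by
  conv_lhs => unfold segcounts

lemma bCnt_nonneg (md : Int) (seg : List (Int × Int)) : 0 ≤ bCnt md seg := by
  induction seg with
  | nil => simp [bCnt]
  | cons p rest ih =>
    simp only [bCnt, List.map_cons, List.sum_cons] at *
    split <;> omega

lemma le_foldl_max (l : List Int) (s : Int) : s ≤ l.foldl max s := by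
  induction l generalizing s with
  | nil => simp
  | cons a l ih => exact le_trans (le_max_left s a) (ih (max s a))

lemma foldl_max_init (l : List Int) (a b : Int) :
    l.foldl max (max a b) = max a (l.foldl max b) := by
  induction l generalizing b with
  | nil => simp
  | cons c l ih => simp only [List.foldl_cons, max_assoc, ih]

-- Python max(ap ++ [tc]) as a fold, for nonnegative entries
lemma max_append_singleton (ap : List Int) (tc : Int) (htc : 0 ≤ tc)
    (hap : ∀ x ∈ ap, 0 ≤ x) :
    ((ap ++ [tc]).max?).getD 0 = max (ap.foldl max 0) tc := by
  cases ap with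
  | nil => simp [List.max?, max_eq_right htc]
  | cons a rest =>
    have ha : 0 ≤ a := hap a (by simp)
    simp only [List.cons_append, List.max?, Option.getD_some, List.foldl_append,
      List.foldl_cons, List.foldl_nil]
    rw [max_eq_right ha]

-- ===== A-side: A's fold computes max over segcounts =====
lemma A_main (md : Int) (l : List (Int × Int)) : ∀ (tc tp : Int) (ap : List Int),
    0 ≤ tc → (∀ x ∈ ap, 0 ≤ x) →
    (((l.foldl (stepA md) (tc, tp, ap)).2.2 ++ [(l.foldl (stepA md) (tc, tp, ap)).1]).max?).getD 0
      = max (ap.foldl max 0)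
          ((segcounts md (l.drop (chainLen tp l))).foldl max (tc + bCnt md (l.take (chainLen tp l)))) := by
  induction l with
  | nil =>
    intro tc tp ap htc hap
    simpa [chainLen, segcounts_nil, bCnt] using max_append_singleton ap tc htc hap
  | cons p l ih =>
    intro tc tp ap htc hap
    by_cases hc : p.1 = tp + 1
    · -- continuous step
      have hne : ¬ (tp + 1 ≠ p.1) := by omega
      have hstep : stepA md (tc, tp, ap) p
          = (tc + (if p.2 < md then (1 : Int) else 0), p.1, ap) := by
        simp only [stepA, if_neg hne]
        split <;> simp
      simp only [List.foldl_cons, hstep]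
      rw [ih (tc + (if p.2 < md then (1 : Int) else 0)) p.1 ap (by split <;> omega) hap]
      simp only [chainLen, if_pos hc, List.take_succ_cons, List.drop_succ_cons,
        bCnt, List.map_cons, List.sum_cons]
      ring_nf
    · -- discontinuity: flush nonzero count, reset
      have hne : tp + 1 ≠ p.1 := by omega
      have hstep : stepA md (tc, tp, ap) p
          = ((if p.2 < md then (1 : Int) else 0), p.1,
             if tc ≠ 0 then ap ++ [tc] else ap) := by
        simp only [stepA, if_pos hne]
        split <;> simp
      simp only [List.foldl_cons, hstep]
      have hap' : ∀ x ∈ (if tc ≠ 0 then ap ++ [tc] else ap), 0 ≤ x := by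
        intro x hx
        split at hx
        · rcases List.mem_append.mp hx with h | h
          · exact hap x h
          · simp at h; omega
        · exact hap x hx
      have hmax' : (if tc ≠ 0 then ap ++ [tc] else ap).foldl max 0 = max (ap.foldl max 0) tc := by
        split
        · rw [List.foldl_append]; simp
        · have h0 : tc = 0 := by omega
          have := le_foldl_max ap 0
          omega
      rw [ih (if p.2 < md then (1 : Int) else 0) p.1 _ (by split <;> omega) hap', hmax']
      simp only [chainLen, if_neg hc, List.take_zero, List.drop_zero,
        segcounts_cons, bCnt, List.map_nil, List.sum_nil, List.map_cons, List.sum_cons,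
        List.foldl_cons, add_zero]
      rw [foldl_max_init]
      omega

-- ===== B-side: the two-pointer loops compute segcounts =====
lemma bInner_eq (pairs : List (Int × Int)) :
    ∀ m j, pairs.length - j ≤ m → 1 ≤ j → j ≤ pairs.length →
    bInner pairs pairs.length j = j + chainLen (pairs.getD (j - 1) (0, 0)).1 (pairs.drop j) := by
  intro m
  induction m with
  | zero =>
    intro j hm h1 hn
    have hj : j = pairs.length := by omega
    rw [bInner]
    split
    · omega
    · rw [hj]
      simp [chainLen]
  | succ m ih =>
    intro j hm h1 hn
    rw [bInner]
    by_cases hlt : j < pairs.length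
    · have hdrop : pairs.drop j = pairs[j] :: pairs.drop (j + 1) :=
        List.drop_eq_getElem_cons hlt
      have hgd : pairs.getD j (0, 0) = pairs[j] := List.getD_eq_getElem pairs (0, 0) hlt
      by_cases hkey : (pairs.getD j (0, 0)).1 = (pairs.getD (j - 1) (0, 0)).1 + 1
      · rw [dif_pos ⟨hlt, hkey⟩]
        rw [ih (j + 1) (by omega) (by omega) (by omega)]
        have h11 : (j + 1) - 1 = j := by omega
        rw [h11, hgd, hdrop]
        simp only [chainLen, hgd] at hkey ⊢
        rw [if_pos hkey]
        omega
      · rw [dif_neg (by rintro ⟨_, h⟩; exact hkey h)]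
        rw [hdrop]
        simp only [chainLen, hgd] at hkey ⊢
        rw [if_neg hkey]
        omega
    · rw [dif_neg (by rintro ⟨h, _⟩; exact hlt h)]
      have hj : j = pairs.length := by omega
      rw [hj]
      simp [chainLen]

lemma bOuter_eq (md : Int) (pairs : List (Int × Int)) :
    ∀ m i, pairs.length - i ≤ m → i ≤ pairs.length →
    bOuter md pairs pairs.length i = segcounts md (pairs.drop i) := by
  intro m
  induction m with
  | zero =>
    intro i hm hn
    have hi : i = pairs.length := by omega
    rw [bOuter, dif_neg (by omega), hi]
    simp [segcounts_nil]
  | succ m ih =>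
    intro i hm hn
    by_cases hlt : i < pairs.length
    · rw [bOuter, dif_pos hlt]
      have hdrop : pairs.drop i = pairs[i] :: pairs.drop (i + 1) :=
        List.drop_eq_getElem_cons hlt
      have hgd : pairs.getD i (0, 0) = pairs[i] := List.getD_eq_getElem pairs (0, 0) hlt
      set k := chainLen (pairs[i]).1 (pairs.drop (i + 1)) with hk
      have hkle : k ≤ pairs.length - (i + 1) := by
        have := chainLen_le (pairs[i]).1 (pairs.drop (i + 1))
        simpa using this
      have hj : bInner pairs pairs.length (i + 1) = (i + 1) + k := by
        rw [bInner_eq pairs (pairs.length - (i + 1)) (i + 1) le_rfl (by omega) (by omega)]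
        have : (i + 1) - 1 = i := by omega
        rw [this, hgd]
      show bCnt md (PySem.List.slice pairs (some (i : Int))
            (some ((bInner pairs pairs.length (i + 1) : Nat) : Int)))
          :: bOuter md pairs pairs.length (bInner pairs pairs.length (i + 1))
          = segcounts md (pairs.drop i)
      rw [hj]
      have hslice : PySem.List.slice pairs (some (i : Int)) (some (((i + 1) + k : Nat) : Int))
          = (pairs.drop i).take ((i + 1 + k) - i) := PySem.List.slice_natCast pairs i (i + 1 + k)
      rw [hslice, hdrop]
      have h1 : (i + 1 + k) - i = k + 1 := by omega
      rw [h1, List.take_succ_cons]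
      rw [ih (i + 1 + k) (by omega) (by omega)]
      rw [segcounts_cons, ← hk, List.drop_drop]
    · rw [bOuter, dif_neg hlt]
      have hi : i = pairs.length := by omega
      rw [hi]
      simp [segcounts_nil]

-- ===== VERDICT (by name: the statement is the Claim_ definition above) =====
theorem findCong_spec : Claim_equal_findCong := by
  intro time dist md _ hpre
  unfold Spec_findCong
  match time with
  | [] => exact absurd rfl hpre
  | t0 :: tr =>
    have hB : findCong_alt (t0 :: tr) dist md
        = ((segcounts md ((t0 :: tr).zip dist)).max?).getD 0 := by
      show ((bOuter md _ _ 0).max?).getD 0 = _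
      rw [bOuter_eq md ((t0 :: tr).zip dist) ((t0 :: tr).zip dist).length 0 le_rfl (by omega)]
      simp
    rw [hB]
    cases dist with
    | nil => simp [findCong, segcounts_nil, List.max?]
    | cons d0 dr =>
      show (_ : Int) = _
      simp only [findCong, List.zip_cons_cons]
      have hA := A_main md ((t0, d0) :: tr.zip dr) 0 (t0 - 1) [] le_rfl (by intro x hx; simp at hx)
      simp only [List.foldl_nil] at hA
      rw [hA]
      have hc : (t0 : Int) = (t0 - 1) + 1 := by omega
      simp only [chainLen, if_pos hc, List.take_succ_cons, List.drop_succ_cons]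
      rw [segcounts_cons]
      simp only [List.max?, Option.getD_some]
      have h1 : (0 : Int) + bCnt md ((t0, d0) :: (tr.zip dr).take (chainLen t0 (tr.zip dr))) =
          bCnt md ((t0, d0) :: (tr.zip dr).take (chainLen t0 (tr.zip dr))) := by omega
      rw [h1]
      have hge : bCnt md ((t0, d0) :: (tr.zip dr).take (chainLen t0 (tr.zip dr)))
          ≤ (segcounts md ((tr.zip dr).drop (chainLen t0 (tr.zip dr)))).foldl max
              (bCnt md ((t0, d0) :: (tr.zip dr).take (chainLen t0 (tr.zip dr)))) := le_foldl_max _ _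
      have hnn := bCnt_nonneg md ((t0, d0) :: (tr.zip dr).take (chainLen t0 (tr.zip dr)))
      omega
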